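-- pv_equiv track=rewrite | github.com/taaaaryu/lab | Opti/variance_system_avail.py | generate_service_combinations
-- ===== SOURCE A (Python) =====
-- from itertools import combinations, chain
--
-- def generate_service_combinations(services):
--     all_combinations = []
--     n = len(services)
--     for num_software in range(1, n + 1):
--         for indices in combinations(range(n - 1), num_software - 1):
--             split_indices = list(chain([-1], indices, [n - 1]))
--             combination = [services[split_indices[i] + 1: split_indices[i + 1] + 1] for i in range(len(split_indices) - 1)]
--             all_combinations.append(combination)
--     return all_combinations
-- ===== SOURCE B (Python) =====
-- def generate_service_combinations(services):
--     def parts(seg, k):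
--         if k == 1:
--             return [[seg]] if seg else []
--         res = []
--         for i in range(1, len(seg) - k + 2):
--             head = seg[:i]
--             for rest in parts(seg[i:], k - 1):
--                 res.append([head] + rest)
--         return res
--     out = []
--     for k in range(1, len(services) + 1):
--         out.extend(parts(services, k))
--     return out
-- ===== Notes on version B (the rewrite author's own statement) =====
-- stated objective: alternative
-- what changed: A enumerates cut-index combinations via itertools.combinations and rebuilds each partition by slicing between consecutive split indices; B generates the compositions directly by a recursion on the number of parts, prepending each prefix to the compositions of the remaining suffix.
import Mathlib
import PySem

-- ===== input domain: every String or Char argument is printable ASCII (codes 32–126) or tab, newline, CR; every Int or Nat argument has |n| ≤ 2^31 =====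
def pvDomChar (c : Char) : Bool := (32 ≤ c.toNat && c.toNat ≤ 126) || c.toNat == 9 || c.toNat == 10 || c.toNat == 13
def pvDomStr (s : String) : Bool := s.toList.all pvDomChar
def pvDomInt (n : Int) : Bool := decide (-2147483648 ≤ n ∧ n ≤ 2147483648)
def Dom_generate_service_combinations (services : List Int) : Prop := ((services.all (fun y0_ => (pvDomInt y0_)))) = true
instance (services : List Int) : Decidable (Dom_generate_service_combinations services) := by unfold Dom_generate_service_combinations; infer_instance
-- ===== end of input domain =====

-- B replaces A's itertools enumeration of cut-index combinations by a direct recursion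
-- generating the compositions into exactly k contiguous nonempty parts (alternative
-- decomposition; same output in the same order).

-- ===== PORT A =====
-- port of A: for num_software in 1..n, for indices in combinations(range(n-1), num_software-1),
-- build split_indices = [-1] ++ indices ++ [n-1] and slice services between consecutive splits
def generate_service_combinations (services : List Int) : List (List (List Int)) :=
  let n := services.length
  (PySem.List.pyRange 1 ((n : Int) + 1) 1).foldl (fun acc num_software =>
    acc ++ (PySem.List.combinations (PySem.List.pyRange 0 ((n : Int) - 1) 1) (num_software - 1).toNat).map
      (fun indices =>
        let split : List Int := [-1] ++ indices ++ [(n : Int) - 1]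
        (PySem.List.pyRange 0 (PySem.List.len split - 1) 1).map (fun i =>
          PySem.List.slice services (some (PySem.List.pyGetD split i 0 + 1))
                                    (some (PySem.List.pyGetD split (i + 1) 0 + 1))))) []

-- ===== PORT B =====
-- port of B's helper parts(seg, k): compositions of seg into exactly k contiguous nonempty parts,
-- first-part length i ascending; k = 0 is never reached by the caller (Python would recurse forever)
def pvPartsB : List Int → Nat → List (List (List Int))
  | _, 0 => []
  | seg, 1 => if seg.isEmpty then [] else [[seg]]
  | seg, (k + 2) =>
    (PySem.List.pyRange 1 ((seg.length : Int) - (↑k + 2) + 2) 1).flatMap (fun i =>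
      (pvPartsB (PySem.List.slice seg (some i) none) (k + 1)).map
        (fun rest => PySem.List.slice seg none (some i) :: rest))

def generate_service_combinations_alt (services : List Int) : List (List (List Int)) :=
  (PySem.List.pyRange 1 ((services.length : Int) + 1) 1).flatMap
    (fun k => pvPartsB services k.toNat)

-- ===== PRECONDITION & SPEC =====
def Spec_generate_service_combinations (services : List Int) (out : List (List (List Int))) : Prop := out = generate_service_combinations_alt services
instance (services : List Int) (out : List (List (List Int))) : Decidable (Spec_generate_service_combinations services out) := by unfold Spec_generate_service_combinations; infer_instance

-- ===== CLAIM (what is proved, stated in full; the proofs are below) =====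
def Claim_equal_generate_service_combinations : Prop := ∀ (services : List Int), Dom_generate_service_combinations services → Spec_generate_service_combinations services (generate_service_combinations services)

-- ===== LEMMAS AND PROOFS =====

-- the parts A's comprehension builds from the split list prev :: idxs ++ [last]
def pvCutParts (s : List Int) : Int → List Int → Int → List (List Int)
  | prev, [], last => [PySem.List.slice s (some (prev + 1)) (some (last + 1))]
  | prev, c :: cs, last => PySem.List.slice s (some (prev + 1)) (some (c + 1)) :: pvCutParts s c cs last


-- A's inner comprehension equals pvCutParts
theorem pvCompreh_eq (s : List Int) (idxs : List Int) (prev last : Int) :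
    (PySem.List.pyRange 0 (PySem.List.len (prev :: idxs ++ [last]) - 1) 1).map (fun i =>
      PySem.List.slice s (some (PySem.List.pyGetD (prev :: idxs ++ [last]) i 0 + 1))
                         (some (PySem.List.pyGetD (prev :: idxs ++ [last]) (i + 1) 0 + 1)))
      = pvCutParts s prev idxs last := by
  induction idxs generalizing prev with
  | nil =>
    have h1 : PySem.List.len (prev :: ([] : List Int) ++ [last]) - 1 = (0:Int) + 1 := by
      simp [PySem.List.len_eq]
    rw [h1, PySem.List.pyRange_one_singleton]
    simp only [List.map_cons, List.map_nil]
    norm_num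
    rw [PySem.List.pyGetD_ofNat' [prev, last] 1 0]
    simp [pvCutParts]
  | cons c cs ih =>
    have hlen : PySem.List.len (prev :: (c :: cs) ++ [last]) - 1 = ((cs.length : Int) + 1) + 1 := by
      simp [PySem.List.len_eq]
    rw [hlen, PySem.List.pyRange_one_cons (by positivity)]
    simp only [List.map_cons]
    rw [show pvCutParts s prev (c :: cs) last
        = PySem.List.slice s (some (prev + 1)) (some (c + 1)) :: pvCutParts s c cs last from rfl]
    congr 1
    · norm_num
      rw [PySem.List.pyGetD_ofNat' (prev :: c :: (cs ++ [last])) 1 0]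
      simp
    · rw [← ih c]
      have hlen' : PySem.List.len (c :: cs ++ [last]) - 1 = ((cs.length : Int) + 1) := by
        simp [PySem.List.len_eq]
      rw [hlen', PySem.List.pyRange_one, PySem.List.pyRange_one]
      have ht : ((cs.length : Int) + 1 + 1 - (0 + 1)).toNat = cs.length + 1 := by omega
      have ht' : ((cs.length : Int) + 1 - 0).toNat = cs.length + 1 := by omega
      rw [ht, ht', List.map_map, List.map_map]
      apply List.map_congr_left
      intro j hj
      simp only [Function.comp]
      have e1 : (0:Int) + 1 + (j:Int) = ((j+1 : Nat) : Int) := by push_cast; ring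
      have e2 : ((j+1 : Nat) : Int) + 1 = ((j+2 : Nat) : Int) := by push_cast; ring
      have e3 : (0:Int) + (j:Int) = ((j : Nat) : Int) := by ring
      have e4 : ((j : Nat) : Int) + 1 = ((j+1 : Nat) : Int) := by push_cast; ring
      rw [e1, e2, e3, e4, PySem.List.pyGetD_natCast, PySem.List.pyGetD_natCast,
          PySem.List.pyGetD_natCast, PySem.List.pyGetD_natCast]
      simp [List.getD]

-- lexicographic combinations of an integer range, unfolded by the first chosen element
theorem pvComb_flat (t : Nat) (k : Nat) (a b : Int) (ht : (b - a).toNat ≤ t) :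
    PySem.List.combinations (PySem.List.pyRange a b 1) (k + 1)
      = (PySem.List.pyRange a b 1).flatMap (fun c =>
          (PySem.List.combinations (PySem.List.pyRange (c + 1) b 1) k).map (c :: ·)) := by
  induction t generalizing a with
  | zero =>
    rw [PySem.List.pyRange_one_eq_nil (by omega)]
    simp [PySem.List.combinations_nil_succ]
  | succ t ih =>
    by_cases hab : a < b
    · rw [PySem.List.pyRange_one_cons hab, PySem.List.combinations_cons_succ,
          List.flatMap_cons, ih (a + 1) (by omega)]
    · rw [PySem.List.pyRange_one_eq_nil (by omega)]
      simp [PySem.List.combinations_nil_succ]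


-- heart of the equivalence: A's enumeration of cut-index combinations at suffix position p equals B's recursion
theorem pvMain (k : Nat) (s : List Int) (p : Nat) (hp : p < s.length) :
    (PySem.List.combinations (PySem.List.pyRange (p : Int) ((s.length : Int) - 1) 1) k).map
      (fun idxs => pvCutParts s ((p : Int) - 1) idxs ((s.length : Int) - 1))
      = pvPartsB (s.drop p) (k + 1) := by
  induction k generalizing p with
  | zero =>
    rw [PySem.List.combinations_zero]
    have h1 : ((p : Int) - 1 + 1) = ((p : Nat) : Int) := by ring
    have h2 : ((s.length : Int) - 1 + 1) = ((s.length : Nat) : Int) := by ring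
    simp only [List.map_cons, List.map_nil, pvCutParts, h1, h2, PySem.List.slice_natCast]
    rw [List.take_of_length_le (by simp)]
    have hne : (s.drop p).isEmpty = false := by
      simp [List.drop_eq_nil_iff]; omega
    rw [show pvPartsB (s.drop p) 1 = if (s.drop p).isEmpty then [] else [[s.drop p]] from rfl, hne]
    simp
  | succ k ih =>
    -- RHS unfold
    rw [show pvPartsB (s.drop p) (k + 2)
        = (PySem.List.pyRange 1 (((s.drop p).length : Int) - (↑k + 2) + 2) 1).flatMap (fun i =>
            (pvPartsB (PySem.List.slice (s.drop p) (some i) none) (k + 1)).map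
              (fun rest => PySem.List.slice (s.drop p) none (some i) :: rest)) from rfl]
    rw [pvComb_flat ((((s.length : Int)) - 1 - p).toNat) k _ _ le_rfl, List.map_flatMap]
    rw [PySem.List.pyRange_one, PySem.List.pyRange_one]
    rw [List.flatMap_map, List.flatMap_map]
    have hlen : (s.drop p).length = s.length - p := List.length_drop
    have hbound : (((s.drop p).length : Int) - (↑k + 2) + 2 - 1).toNat = s.length - p - k - 1 := by
      rw [hlen]; omega
    have hbound2 : (((s.length : Int)) - 1 - p).toNat = s.length - p - 1 := by omega
    rw [hbound, hbound2]
    by_cases hbig : k + 1 ≤ s.length - p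
    · have hsplit : s.length - p - 1 = (s.length - p - k - 1) + k := by omega
      rw [hsplit, List.range_add, List.flatMap_append]
      have h2 : (List.map (fun x => s.length - p - k - 1 + x) (List.range k)).flatMap
          (fun (a : Nat) => List.map (fun idxs => pvCutParts s ((p:Int) - 1) idxs ((s.length:Int) - 1))
            (List.map (fun x => ((p:Int) + ↑a) :: x)
              (PySem.List.combinations (PySem.List.pyRange ((p:Int) + ↑a + 1) ((s.length:Int) - 1)) k))) = [] := by
        rw [List.flatMap_eq_nil_iff]
        intro x hx
        simp only [List.mem_map, List.mem_range] at hx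
        obtain ⟨y, hy, rfl⟩ := hx
        rw [PySem.List.combinations_eq_nil_of_length_lt]
        · simp
        · rw [PySem.List.length_pyRange_one]; omega
      rw [h2, List.append_nil]
      apply List.flatMap_congr
      intro j hj
      simp only [List.mem_range] at hj
      have e1 : (1 : Int) + (j : Int) = ((j + 1 : Nat) : Int) := by push_cast; ring
      rw [e1, PySem.List.slice_from_natCast, PySem.List.slice_to_natCast, List.drop_drop]
      rw [← ih (p + (j + 1)) (by omega), List.map_map, List.map_map]
      have e2 : ((p : Int) + ↑j + 1) = (((p + (j + 1)) : Nat) : Int) := by push_cast; ring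
      rw [e2]
      apply List.map_congr_left
      intro idxs _
      simp only [Function.comp, pvCutParts]
      congr 1
      · have e3 : ((p:Int) - 1 + 1) = ((p : Nat) : Int) := by ring
        have e4 : ((p:Int) + ↑j + 1) = (((p + (j + 1)) : Nat) : Int) := by push_cast; ring
        rw [e3, e4, PySem.List.slice_natCast]
        congr 1
        omega
      · congr 1
        push_cast
        ring
    · have h0 : s.length - p - k - 1 = 0 := by omega
      rw [h0]
      simp only [List.range_zero, List.flatMap_nil]
      rw [List.flatMap_eq_nil_iff]
      intro j hj
      simp only [List.mem_range] at hj
      rw [PySem.List.combinations_eq_nil_of_length_lt]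
      · simp
      · rw [PySem.List.length_pyRange_one]; omega

-- ===== VERDICT (by name: the statement is the Claim_ definition above) =====
theorem generate_service_combinations_spec : Claim_equal_generate_service_combinations := by
  intro services _
  unfold Spec_generate_service_combinations generate_service_combinations generate_service_combinations_alt
  rw [PySem.List.foldl_append_eq_flatMap, List.nil_append]
  apply List.flatMap_congr
  intro j hj
  rw [PySem.List.mem_pyRange_one] at hj
  have hfun : ∀ indices : List Int,
      (PySem.List.pyRange 0 (PySem.List.len ([-1] ++ indices ++ [(services.length : Int) - 1]) - 1) 1).map (fun i =>
        PySem.List.slice services (some (PySem.List.pyGetD ([-1] ++ indices ++ [(services.length : Int) - 1]) i 0 + 1))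
                                  (some (PySem.List.pyGetD ([-1] ++ indices ++ [(services.length : Int) - 1]) (i + 1) 0 + 1)))
        = pvCutParts services (-1) indices ((services.length : Int) - 1) := by
    intro indices
    simpa using pvCompreh_eq services indices (-1) ((services.length : Int) - 1)
  simp only [hfun]
  have hn : 0 < services.length := by omega
  have hj' : j = ((j.toNat : Nat) : Int) := by omega
  have hm := pvMain (j.toNat - 1) services 0 hn
  simp only [Nat.cast_zero, List.drop_zero] at hm
  have hz : ((0:Int) - 1) = (-1 : Int) := by ring
  rw [hz] at hm
  have hk : j.toNat - 1 + 1 = j.toNat := by omega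
  rw [hk] at hm
  have harg : (j - 1).toNat = j.toNat - 1 := by omega
  rw [harg, hm]
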